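-- pv_equiv track=rewrite | github.com/23andMe/bonsaitree | bonsaitree/v3/pedigrees.py | get_rel_ct_dict
-- ===== SOURCE A (Python) =====
-- def get_rel_set(
--     node_dict : dict[int, dict[int, int]],
--     i : int,
-- ):
--     """
--     If node_dict is an up_dict, get a set of all ancestors of i
--     (including i)
--
--     If node_dict is a down_dict, get the set of all descendants
--     of i including i
--
--     up_node_dict : {i : {anc_1 : deg_1, anc_2 : deg_2}, ...}
--     or
--     down_node_dict : {i : {anc_1 : deg_1, anc_2 : deg_2}, ...}
--
--     rel_set : {r1, r2, ...}
--     """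
--
--     rel_deg_dict = get_rel_deg_dict(node_dict, i)
--     rel_set = {*rel_deg_dict}
--
--     return rel_set
--
-- def get_rel_deg_dict(
--     node_dict : dict[int, dict[int, int]],
--     i : int,
-- ):
--     """
--     If node_dict is an up_dict, get a dict mapping each ancestor
--     of i (including i) to its degree from i, where the degree
--     is the shortest degree over all possible paths.
--
--     If node_dict is a down_dict, get a similar dict mapping
--     each descendant of i to its degree to i
--
--     up_node_dict : {i : {anc_1 : deg_1, anc_2 : deg_2}, ...}
--     or
--     down_node_dict : {i : {anc_1 : deg_1, anc_2 : deg_2}, ...}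
--
--     deg_dict : {r1 : d1, r2 : d2, ...}
--     """
--
--     deg_dict = {i : 0}
--     for r1,d1 in node_dict.get(i,{}).items():
--
--         r1_deg_dict = get_rel_deg_dict(node_dict, r1)
--         for r2,d2 in r1_deg_dict.items():
--             if r2 in deg_dict:
--                 deg_dict[r2] = min(d1+d2, deg_dict[r2])
--             else:
--                 deg_dict[r2] = d1+d2
--
--     return deg_dict
--
-- def get_rel_ct_dict(
--     dct: dict[int, dict[int, int]],
--     id_set: set[int],
-- ):
--     """
--     For an up_dict, get a dict mapping
--     every ancestor of the IDs in id_set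
--     including the IDs themselves to
--     the number of offspring they have
--     in id_set.
--
--     For a down_node_dict, get a dict
--     mapping each descendant of a node
--     in id_set to the number of ancestors
--     they have in id_set.
--
--     Args:
--         dct: up_dct or down_dct
--         id_set: set of integer IDs
--
--     Returns:
--         rel_ct_dict
--     """
--     rel_ct_dict = {}
--     for iid in id_set:
--         rel_set = get_rel_set(
--             node_dict=dct,
--             i=iid,
--         )  # all ancs or descendants of i
--         for r in rel_set:
--             if r not in rel_ct_dict:
--                 rel_ct_dict[r] = 0
--             rel_ct_dict[r] += 1
--     return rel_ct_dict
-- ===== SOURCE B (Python) =====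
-- def get_rel_ct_dict(dct, id_set):
--     """Count, for every node reachable from some iid in id_set, the number of
--     iids that reach it — single DFS with a visited set per iid (no degree
--     computation, no re-exploration of shared subtrees)."""
--     rel_ct_dict = {}
--
--     def dfs(v, seen):
--         if v in seen:
--             return
--         seen.add(v)
--         rel_ct_dict[v] = rel_ct_dict.get(v, 0) + 1
--         for w in dct.get(v, {}):
--             dfs(w, seen)
--
--     for iid in id_set:
--         dfs(iid, set())
--     return rel_ct_dict
-- ===== Notes on version B (the rewrite author's own statement) =====
-- stated objective: alternative
-- what changed: A recomputes, for every relative, a full degree dict by unmemoized path recursion (re-exploring shared subtrees once per path, exponential on diamond-heavy DAGs) and then only uses its key set; B drops the degree computation entirely and runs one DFS with a visited set per id, bumping each node's count at its first visit.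
import Mathlib
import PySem

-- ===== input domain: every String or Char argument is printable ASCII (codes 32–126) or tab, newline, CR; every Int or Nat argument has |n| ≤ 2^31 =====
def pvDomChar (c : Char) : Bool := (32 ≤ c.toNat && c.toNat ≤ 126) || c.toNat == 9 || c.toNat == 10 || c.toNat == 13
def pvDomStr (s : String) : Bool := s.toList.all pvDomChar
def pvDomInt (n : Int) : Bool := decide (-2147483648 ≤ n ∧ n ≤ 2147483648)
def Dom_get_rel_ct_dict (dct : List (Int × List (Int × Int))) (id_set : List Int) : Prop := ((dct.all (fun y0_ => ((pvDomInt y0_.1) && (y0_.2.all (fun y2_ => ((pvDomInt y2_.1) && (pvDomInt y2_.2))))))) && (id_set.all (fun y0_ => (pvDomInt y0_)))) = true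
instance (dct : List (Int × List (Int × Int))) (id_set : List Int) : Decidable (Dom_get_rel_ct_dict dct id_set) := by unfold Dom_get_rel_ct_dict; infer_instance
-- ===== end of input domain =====

-- B replaces A's unmemoized per-relative degree recursion by a single DFS with a
-- visited set per id (counts only, no degrees); return value proved identical on
-- every cycle-free-reachable input (outside, A's recursion does not terminate).

-- ===== PORT A =====
-- dct.get(i, {}) (shared helper: both Pythons read the adjacency the same way)
def pvSucc (dct : List (Int × List (Int × Int))) (i : Int) : List (Int × Int) :=
  PySem.Dict.getD (PySem.Dict.mk dct) i []

-- get_rel_deg_dict, fueled: Python's recursion has no fuel; under Pre_ (acyclic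
-- dct) recursion depth is ≤ dct.length + 1, so the fuel never runs out.
def pvDegDict (dct : List (Int × List (Int × Int))) : Nat → Int → PySem.Dict Int Int
  | 0, i => PySem.Dict.insert PySem.Dict.empty i 0
  | fuel+1, i =>
    (pvSucc dct i).foldl
      (fun dd rd =>
        (PySem.Dict.items (pvDegDict dct fuel rd.1)).foldl
          (fun dd2 rd2 =>
            match PySem.Dict.get? dd2 rd2.1 with
            | some d => PySem.Dict.insert dd2 rd2.1 (min (rd.2 + rd2.2) d)
            | none   => PySem.Dict.insert dd2 rd2.1 (rd.2 + rd2.2))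
          dd)
      (PySem.Dict.insert PySem.Dict.empty i 0)

-- get_rel_set
def pvRelSet (dct : List (Int × List (Int × Int))) (i : Int) : PySem.Set Int :=
  PySem.Set.ofList (PySem.Dict.keys (pvDegDict dct (dct.length + 1) i))

def get_rel_ct_dict (dct : List (Int × List (Int × Int))) (id_set : List Int) : List (Int × Int) :=
  PySem.Dict.items
    (id_set.foldl
      (fun cts iid =>
        (pvRelSet dct iid).foldl
          (fun cts2 r =>
            let c1 := if PySem.Dict.contains cts2 r then cts2 else PySem.Dict.insert cts2 r 0
            PySem.Dict.insert c1 r (PySem.Dict.getD c1 r 0 + 1))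
          cts)
      PySem.Dict.empty)

-- ===== PORT B =====
-- dfs(v, seen) from Source B, carrying (seen, rel_ct_dict); fueled the same way.
def pvDfs (dct : List (Int × List (Int × Int))) :
    Nat → Int → PySem.Set Int × PySem.Dict Int Int → PySem.Set Int × PySem.Dict Int Int
  | 0, _, st => st
  | fuel+1, v, st =>
    if PySem.Set.contains st.1 v then st
    else
      (pvSucc dct v).foldl
        (fun st2 rd => pvDfs dct fuel rd.1 st2)
        (PySem.Set.add st.1 v, PySem.Dict.insert st.2 v (PySem.Dict.getD st.2 v 0 + 1))

def get_rel_ct_dict_alt (dct : List (Int × List (Int × Int))) (id_set : List Int) : List (Int × Int) :=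
  PySem.Dict.items
    (id_set.foldl (fun cts iid => (pvDfs dct (dct.length + 1) iid (PySem.Set.empty, cts)).2)
      PySem.Dict.empty)

-- ===== PRECONDITION & SPEC =====
def pvSuccKeys (dct : List (Int × List (Int × Int))) (i : Int) : List Int :=
  (pvSucc dct i).map Prod.fst

-- one round of closing a node set under the successor relation
def pvStep (dct : List (Int × List (Int × Int))) (s : List Int) : List Int :=
  PySem.Set.ofList (s ++ s.flatMap (pvSuccKeys dct))

-- all nodes reachable from s0 (the iteration count is enough for the bounded
-- closure to reach its fixpoint, proved in closure_complete below)
def pvClosure (dct : List (Int × List (Int × Int))) (s0 : List Int) : List Int :=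
  (pvStep dct)^[dct.length + (dct.flatMap Prod.snd).length + s0.length + 1] s0

-- Pre_ excludes exactly the inputs with a directed cycle reachable from id_set:
-- there A's unmemoized recursion never terminates (Python raises RecursionError).
def Pre_get_rel_ct_dict (dct : List (Int × List (Int × Int))) (id_set : List Int) : Prop :=
  ∀ k ∈ pvClosure dct id_set, k ∉ pvClosure dct (pvSuccKeys dct k)

instance (dct : List (Int × List (Int × Int))) (id_set : List Int) : Decidable (Pre_get_rel_ct_dict dct id_set) := by
  unfold Pre_get_rel_ct_dict; infer_instance

def pvWitness_get_rel_ct_dict : (List (Int × List (Int × Int))) × List Int :=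
  ([(1, [(2, 1), (3, 1)]), (2, [(3, 1)])], [1, 3])

def Spec_get_rel_ct_dict (dct : List (Int × List (Int × Int))) (id_set : List Int) (out : List (Int × Int)) : Prop := out = get_rel_ct_dict_alt dct id_set
instance (dct : List (Int × List (Int × Int))) (id_set : List Int) (out : List (Int × Int)) : Decidable (Spec_get_rel_ct_dict dct id_set out) := by unfold Spec_get_rel_ct_dict; infer_instance

-- ===== CLAIM (what is proved, stated in full; the proofs are below) =====
def Claim_equal_get_rel_ct_dict : Prop := ∀ (dct : List (Int × List (Int × Int))) (id_set : List Int), Dom_get_rel_ct_dict dct id_set → Pre_get_rel_ct_dict dct id_set → Spec_get_rel_ct_dict dct id_set (get_rel_ct_dict dct id_set)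

-- ===== LEMMAS AND PROOFS =====

-- graph vocabulary
def pvEdge (dct : List (Int × List (Int × Int))) (i j : Int) : Prop := j ∈ pvSuccKeys dct i
def pvReach (dct : List (Int × List (Int × Int))) : Int → Int → Prop :=
  Relation.ReflTransGen (pvEdge dct)
-- no cycle among the nodes reachable from v
def pvRootAcyclic (dct : List (Int × List (Int × Int))) (v : Int) : Prop :=
  ∀ a b, pvReach dct v a → pvEdge dct a b → pvReach dct b a → False

-- number of dict keys reachable from i (proof-only measure)
noncomputable def pvM (dct : List (Int × List (Int × Int))) (i : Int) : Nat :=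
  (@Finset.filter Int (fun k => pvReach dct i k) (fun k => Classical.propDecidable _)
    (dct.map Prod.fst).toFinset).card

-- first occurrences in l of elements not already in s
def pvNews (s : List Int) : List Int → List Int
  | [] => []
  | x :: l => if x ∈ s then pvNews s l else x :: pvNews (s ++ [x]) l

def pvBump (cts : PySem.Dict Int Int) (r : Int) : PySem.Dict Int Int :=
  PySem.Dict.insert cts r (PySem.Dict.getD cts r 0 + 1)

def pvAK (dct : List (Int × List (Int × Int))) (f : Nat) (i : Int) : List Int :=
  PySem.Dict.keys (pvDegDict dct f i)

-- ---- structure of pvSucc ----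
theorem pvSucc_cases (dct : List (Int × List (Int × Int))) (i : Int) :
    pvSucc dct i = [] ∨ (i ∈ dct.map Prod.fst ∧ ∃ p ∈ dct, p.1 = i ∧ pvSucc dct i = p.2) := by
  unfold pvSucc
  induction dct with
  | nil => left; rfl
  | cons p l ih =>
    rw [PySem.Dict.getD_eq_get?_getD]
    rw [show PySem.Dict.mk (p :: l) = PySem.Dict.mk ((p.1, p.2) :: l) by rfl]
    rw [PySem.Dict.get?_mk_cons]
    by_cases h : p.1 = i
    · subst h; simp only [BEq.rfl, if_true]
      right
      refine ⟨List.mem_map_of_mem (List.mem_cons_self ..), p, List.mem_cons_self .., rfl, rfl⟩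
    · have hb : (p.1 == i) = false := by simpa using h
      rw [hb]; simp only [Bool.false_eq_true, if_false]
      rw [← PySem.Dict.getD_eq_get?_getD]
      rcases ih with h0 | ⟨hm, q, hq, h1, h2⟩
      · left; exact h0
      · right
        exact ⟨by simpa using Or.inr (by simpa using hm), q, List.mem_cons_of_mem _ hq, h1, h2⟩

-- ---- pvNews toolkit ----
theorem update_eq_append_news (l s : List Int) :
    PySem.Set.update s l = s ++ pvNews s l := by
  induction l generalizing s with
  | nil => simp [pvNews, PySem.Set.update_nil]
  | cons x l ih =>
    rw [PySem.Set.update_cons, pvNews]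
    by_cases h : x ∈ s
    · rw [if_pos h, PySem.Set.add_of_mem h, ih]
    · rw [if_neg h, PySem.Set.add_of_not_mem h, ih, List.append_assoc]
      rfl

theorem mem_append_news (l s : List Int) (x : Int) :
    x ∈ s ++ pvNews s l ↔ x ∈ s ∨ x ∈ l := by
  rw [← update_eq_append_news]
  exact PySem.Set.mem_update _ _ _

theorem mem_of_mem_news (l s : List Int) (x : Int) (h : x ∈ pvNews s l) : x ∈ l := by
  induction l generalizing s with
  | nil => simp [pvNews] at h
  | cons a l ih =>
    rw [pvNews] at h
    by_cases ha : a ∈ s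
    · rw [if_pos ha] at h; exact List.mem_cons_of_mem _ (ih _ h)
    · rw [if_neg ha, List.mem_cons] at h
      rcases h with h | h
      · subst h; exact List.mem_cons_self ..
      · exact List.mem_cons_of_mem _ (ih _ h)

theorem news_append (l1 l2 s : List Int) :
    pvNews s (l1 ++ l2) = pvNews s l1 ++ pvNews (s ++ pvNews s l1) l2 := by
  induction l1 generalizing s with
  | nil => simp [pvNews]
  | cons a l1 ih =>
    by_cases ha : a ∈ s
    · simp only [List.cons_append, pvNews, if_pos ha]
      exact ih s
    · simp only [List.cons_append, pvNews, if_neg ha]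
      rw [ih (s ++ [a]), List.append_assoc]
      rfl

theorem news_nil_of_subset (l s : List Int) (h : ∀ x ∈ l, x ∈ s) : pvNews s l = [] := by
  induction l generalizing s with
  | nil => rfl
  | cons a l ih =>
    rw [pvNews, if_pos (h a (List.mem_cons_self ..))]
    exact ih _ (fun x hx => h x (List.mem_cons_of_mem _ hx))

theorem news_news (l t S : List Int) (h : ∀ x ∈ t, x ∈ S) :
    pvNews S (pvNews t l) = pvNews S l := by
  induction l generalizing t S with
  | nil => rfl
  | cons a l ih =>
    rw [pvNews]
    by_cases hat : a ∈ t
    · rw [if_pos hat, pvNews, if_pos (h a hat)]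
      exact ih t S h
    · rw [if_neg hat, pvNews]
      by_cases haS : a ∈ S
      · rw [if_pos haS, pvNews, if_pos haS]
        exact ih (t ++ [a]) S (by
          intro x hx
          rcases List.mem_append.1 hx with hx | hx
          · exact h x hx
          · simp only [List.mem_singleton] at hx; subst hx; exact haS)
      · rw [if_neg haS, pvNews, if_neg haS]
        congr 1
        exact ih (t ++ [a]) (S ++ [a]) (by
          intro x hx
          rcases List.mem_append.1 hx with hx | hx
          · exact List.mem_append.2 (Or.inl (h x hx))
          · exact List.mem_append.2 (Or.inr hx))

theorem news_update (s t l : List Int) :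
    pvNews s (PySem.Set.update t l) = pvNews s (t ++ l) := by
  rw [update_eq_append_news, news_append, news_append]
  congr 1
  exact news_news _ _ _ (fun x hx => (mem_append_news t s x).2 (Or.inr hx))

theorem news_disjoint (l : List Int) : ∀ s, l.Nodup → (∀ x ∈ l, x ∉ s) → pvNews s l = l := by
  induction l with
  | nil => intro s _ _; rfl
  | cons a l ih =>
    intro s hnd hdis
    rw [List.nodup_cons] at hnd
    rw [pvNews, if_neg (hdis a (List.mem_cons_self ..))]
    congr 1
    refine ih _ hnd.2 ?_
    intro x hx
    rw [List.mem_append]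
    rintro (h | h)
    · exact hdis x (List.mem_cons_of_mem _ hx) h
    · simp only [List.mem_singleton] at h; subst h; exact hnd.1 hx

theorem news_nil_left (l : List Int) (h : l.Nodup) : pvNews [] l = l :=
  news_disjoint l [] h (by simp)

-- ---- A-side key structure ----
theorem keys_inner_fold (dct : List (Int × List (Int × Int))) (f : Nat) (rd : Int × Int)
    (dd : PySem.Dict Int Int) :
    PySem.Dict.keys
      ((PySem.Dict.items (pvDegDict dct f rd.1)).foldl
        (fun dd2 rd2 =>
          match PySem.Dict.get? dd2 rd2.1 with
          | some d => PySem.Dict.insert dd2 rd2.1 (min (rd.2 + rd2.2) d)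
          | none   => PySem.Dict.insert dd2 rd2.1 (rd.2 + rd2.2))
        dd) = PySem.Set.update dd.keys (pvAK dct f rd.1) := by
  have hfun : (fun (dd2 : PySem.Dict Int Int) (rd2 : Int × Int) =>
      match PySem.Dict.get? dd2 rd2.1 with
      | some d => PySem.Dict.insert dd2 rd2.1 (min (rd.2 + rd2.2) d)
      | none   => PySem.Dict.insert dd2 rd2.1 (rd.2 + rd2.2)) =
      (fun dd2 rd2 => PySem.Dict.insert dd2 rd2.1
        (match PySem.Dict.get? dd2 rd2.1 with
         | some d => min (rd.2 + rd2.2) d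
         | none   => rd.2 + rd2.2)) := by
    funext dd2 rd2
    cases PySem.Dict.get? dd2 rd2.1 <;> rfl
  rw [hfun]
  exact PySem.Dict.keys_foldl_insert_key _ _ _ _

theorem foldl_update_flatMap (g : Int × Int → List Int) :
    ∀ (cs : List (Int × Int)) (s : List Int),
      cs.foldl (fun ks rd => PySem.Set.update ks (g rd)) s = PySem.Set.update s (cs.flatMap g) := by
  intro cs
  induction cs with
  | nil => intro s; simp [PySem.Set.update_nil]
  | cons rd cs ih =>
    intro s
    rw [List.foldl_cons, ih, List.flatMap_cons, PySem.Set.update_append]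

theorem pvAK_zero (dct : List (Int × List (Int × Int))) (i : Int) : pvAK dct 0 i = [i] := by
  unfold pvAK pvDegDict
  simp [PySem.Dict.keys_insert_of_not_contains]

theorem pvAK_succ (dct : List (Int × List (Int × Int))) (f : Nat) (i : Int) :
    pvAK dct (f+1) i =
      PySem.Set.update [i] ((pvSucc dct i).flatMap (fun rd => pvAK dct f rd.1)) := by
  show PySem.Dict.keys (pvDegDict dct (f+1) i) = _
  rw [pvDegDict]
  have houter : ∀ (cs : List (Int × Int)) (dd : PySem.Dict Int Int),
      PySem.Dict.keys (cs.foldl (fun dd rd =>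
        (PySem.Dict.items (pvDegDict dct f rd.1)).foldl
          (fun dd2 rd2 =>
            match PySem.Dict.get? dd2 rd2.1 with
            | some d => PySem.Dict.insert dd2 rd2.1 (min (rd.2 + rd2.2) d)
            | none   => PySem.Dict.insert dd2 rd2.1 (rd.2 + rd2.2))
          dd) dd) =
      cs.foldl (fun ks rd => PySem.Set.update ks (pvAK dct f rd.1)) dd.keys := by
    intro cs
    induction cs with
    | nil => intro dd; rfl
    | cons rd cs ih =>
      intro dd
      rw [List.foldl_cons, List.foldl_cons, ih, keys_inner_fold]
  rw [houter, foldl_update_flatMap]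
  have : (PySem.Dict.insert (PySem.Dict.empty) i (0:Int)).keys = [i] := by
    simp [PySem.Dict.keys_insert_of_not_contains]
  rw [this]

theorem pvAK_nodup (dct : List (Int × List (Int × Int))) (f : Nat) (i : Int) :
    (pvAK dct f i).Nodup := by
  induction f generalizing i with
  | zero => rw [pvAK_zero]; simp
  | succ f ih =>
    rw [pvAK_succ]
    exact PySem.Set.nodup_update _ _ (by simp)

theorem reach_of_mem_pvAK (dct : List (Int × List (Int × Int))) (f : Nat) (i x : Int)
    (h : x ∈ pvAK dct f i) : pvReach dct i x := by
  induction f generalizing i with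
  | zero =>
    rw [pvAK_zero] at h
    simp only [List.mem_singleton] at h
    subst h; exact Relation.ReflTransGen.refl
  | succ f ih =>
    rw [pvAK_succ] at h
    rcases (PySem.Set.mem_update _ _ _).1 h with h | h
    · simp only [List.mem_singleton] at h; subst h; exact Relation.ReflTransGen.refl
    · rcases List.mem_flatMap.1 h with ⟨rd, hrd, hx⟩
      have hedge : pvEdge dct i rd.1 := List.mem_map_of_mem hrd
      exact Relation.ReflTransGen.head hedge (ih _ hx)

theorem pvM_lt_of_edge (dct : List (Int × List (Int × Int)))
    (i r : Int) (h : pvEdge dct i r) (hni : ¬ pvReach dct r i) : pvM dct r < pvM dct i := by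
  classical
  unfold pvM
  apply Finset.card_lt_card
  rw [Finset.ssubset_def]
  constructor
  · intro k hk
    rw [Finset.mem_filter] at hk ⊢
    exact ⟨hk.1, Relation.ReflTransGen.head h hk.2⟩
  · intro hsub
    have hiK : i ∈ dct.map Prod.fst := by
      rcases pvSucc_cases dct i with h0 | ⟨hm, _⟩
      · exfalso
        unfold pvEdge pvSuccKeys at h
        rw [h0] at h
        simp at h
      · exact hm
    have hi : i ∈ @Finset.filter Int (fun k => pvReach dct i k) (fun k => Classical.propDecidable _)
        (dct.map Prod.fst).toFinset := by
      rw [Finset.mem_filter]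
      exact ⟨List.mem_toFinset.2 hiK, Relation.ReflTransGen.refl⟩
    have := hsub hi
    rw [Finset.mem_filter] at this
    exact hni this.2

theorem mem_pvAK_of_reach (dct : List (Int × List (Int × Int))) :
    ∀ f i, pvRootAcyclic dct i → pvM dct i < f → ∀ y, pvReach dct i y → y ∈ pvAK dct f i := by
  intro f
  induction f with
  | zero => intro i _ hf; omega
  | succ f ih =>
    intro i hR hf y hy
    rcases Relation.ReflTransGen.cases_head hy with h | ⟨b, hb, hby⟩
    · subst h
      rw [pvAK_succ]
      exact (PySem.Set.mem_update _ _ _).2 (Or.inl (by simp))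
    · rcases List.mem_map.1 hb with ⟨rd, hrd, hrd1⟩
      have hRb : pvRootAcyclic dct b :=
        fun a c hra hac hca => hR a c (Relation.ReflTransGen.head hb hra) hac hca
      have hlt : pvM dct b < f := by
        have := pvM_lt_of_edge dct i b hb
          (fun hr => hR i b Relation.ReflTransGen.refl hb hr)
        omega
      have hy2 : y ∈ pvAK dct f b := ih b hRb hlt y hby
      rw [pvAK_succ]
      refine (PySem.Set.mem_update _ _ _).2 (Or.inr (List.mem_flatMap.2 ⟨rd, hrd, ?_⟩))
      rw [hrd1]; exact hy2

theorem step_mem_mono (dct : List (Int × List (Int × Int))) (s : List Int) (x : Int)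
    (h : x ∈ s) : x ∈ pvStep dct s := by
  unfold pvStep
  rw [PySem.Set.mem_ofList]
  exact List.mem_append.2 (Or.inl h)

theorem step_closed (dct : List (Int × List (Int × Int))) (s : List Int) (x y : Int)
    (hx : x ∈ s) (hxy : pvEdge dct x y) : y ∈ pvStep dct s := by
  unfold pvStep
  rw [PySem.Set.mem_ofList]
  exact List.mem_append.2 (Or.inr (List.mem_flatMap.2 ⟨x, hx, hxy⟩))

theorem step_congr (dct : List (Int × List (Int × Int))) (s t : List Int)
    (h : ∀ x, x ∈ s ↔ x ∈ t) (x : Int) : x ∈ pvStep dct s ↔ x ∈ pvStep dct t := by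
  unfold pvStep
  rw [PySem.Set.mem_ofList, PySem.Set.mem_ofList, List.mem_append, List.mem_append,
    List.mem_flatMap, List.mem_flatMap]
  constructor
  · rintro (hx | ⟨a, ha, hax⟩)
    · exact Or.inl ((h x).1 hx)
    · exact Or.inr ⟨a, (h a).1 ha, hax⟩
  · rintro (hx | ⟨a, ha, hax⟩)
    · exact Or.inl ((h x).2 hx)
    · exact Or.inr ⟨a, (h a).2 ha, hax⟩

theorem succKeys_sub (dct : List (Int × List (Int × Int))) (i x : Int)
    (h : x ∈ pvSuccKeys dct i) : x ∈ (dct.flatMap Prod.snd).map Prod.fst := by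
  rcases pvSucc_cases dct i with h0 | ⟨_, p, hp, _, h2⟩
  · unfold pvSuccKeys at h; rw [h0] at h; simp at h
  · unfold pvSuccKeys at h
    rw [h2] at h
    rcases List.mem_map.1 h with ⟨rd, hrd, hx⟩
    exact List.mem_map.2 ⟨rd, List.mem_flatMap.2 ⟨p, hp, hrd⟩, hx⟩

-- ---- Pre_ implies acyclicity ----
theorem closure_complete (dct : List (Int × List (Int × Int))) (s0 : List Int)
    (x y : Int) (hx : x ∈ s0) (hy : pvReach dct x y) : y ∈ pvClosure dct s0 := by
  set n := dct.length + (dct.flatMap Prod.snd).length + s0.length + 1 with hn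
  set U : List Int := dct.map Prod.fst ++ ((dct.flatMap Prod.snd).map Prod.fst ++ s0) with hU
  set F : Nat → List Int := fun m => (pvStep dct)^[m] s0 with hF
  have hFs : ∀ k, F (k+1) = pvStep dct (F k) := by
    intro k
    simp only [hF]
    exact Function.iterate_succ_apply' _ _ _
  have hmono : ∀ k x, x ∈ F k → x ∈ F (k+1) := by
    intro k x hx
    rw [hFs]; exact step_mem_mono _ _ _ hx
  have hsubU : ∀ k x, x ∈ F k → x ∈ U := by
    intro k
    induction k with
    | zero =>
      intro z hz
      exact List.mem_append.2 (Or.inr (List.mem_append.2 (Or.inr hz)))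
    | succ k ih =>
      intro z hz
      rw [hFs] at hz
      unfold pvStep at hz
      rw [PySem.Set.mem_ofList, List.mem_append] at hz
      rcases hz with hz | hz
      · exact ih z hz
      · rcases List.mem_flatMap.1 hz with ⟨a, _, haz⟩
        exact List.mem_append.2 (Or.inr (List.mem_append.2 (Or.inl (succKeys_sub dct a z haz))))
  -- pigeonhole: some step before n is a membership fixpoint
  have hfix : ∃ m, m < n ∧ ∀ x, x ∈ F (m+1) ↔ x ∈ F m := by
    by_contra hno
    push_neg at hno
    have hgrow : ∀ m, m < n → ∃ x, x ∈ F (m+1) ∧ x ∉ F m := by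
      intro m hm
      rcases hno m hm with ⟨z, hz⟩
      rcases hz with ⟨h2, h1⟩ | ⟨h2, h1⟩
      · exact ⟨z, h2, h1⟩
      · exact absurd (hmono m z h1) h2
    have hcard : ∀ m, m ≤ n → m ≤ (F m).toFinset.card := by
      intro m
      induction m with
      | zero => intro _; omega
      | succ m ih =>
        intro hm
        have h1 : m ≤ (F m).toFinset.card := ih (by omega)
        rcases hgrow m (by omega) with ⟨z, hz1, hz2⟩
        have hss : (F m).toFinset ⊂ (F (m+1)).toFinset := by
          rw [Finset.ssubset_def]
          constructor
          · intro w hw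
            exact List.mem_toFinset.2 (hmono m w (List.mem_toFinset.1 hw))
          · intro hsub
            exact hz2 (List.mem_toFinset.1 (hsub (List.mem_toFinset.2 hz1)))
        have := Finset.card_lt_card hss
        omega
    have h1 : n ≤ (F n).toFinset.card := hcard n (le_refl n)
    have h2 : (F n).toFinset ⊆ U.toFinset := by
      intro w hw
      exact List.mem_toFinset.2 (hsubU n w (List.mem_toFinset.1 hw))
    have h3 := Finset.card_le_card h2
    have h4 := List.toFinset_card_le U
    have h5 : U.length = dct.length + ((dct.flatMap Prod.snd).length + s0.length) := by
      simp [hU]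
    omega
  rcases hfix with ⟨m0, hm0, hiff⟩
  -- membership is stable from m0 on
  have hstab : ∀ k x, x ∈ F (m0 + k) ↔ x ∈ F m0 := by
    intro k
    induction k with
    | zero => intro x; rfl
    | succ k ih =>
      intro z
      have : m0 + (k+1) = (m0 + k) + 1 := by omega
      rw [this, hFs]
      calc z ∈ pvStep dct (F (m0 + k)) ↔ z ∈ pvStep dct (F m0) := step_congr dct _ _ ih z
        _ ↔ z ∈ F (m0 + 1) := by rw [hFs]
        _ ↔ z ∈ F m0 := hiff z
  have hx0 : x ∈ F m0 := by
    have : ∀ k, x ∈ F k := by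
      intro k
      induction k with
      | zero => exact hx
      | succ k ih => exact hmono k x ih
    exact this m0
  have hclosed : ∀ z, pvReach dct x z → z ∈ F m0 := by
    intro z hz
    induction hz with
    | refl => exact hx0
    | tail hab hbc ih =>
      have : _ ∈ pvStep dct (F m0) := step_closed dct (F m0) _ _ ih hbc
      rw [← hFs] at this
      exact (hstab 1 _).1 (by simpa using this)
  have h1 : y ∈ F m0 := hclosed y hy
  have h2 : m0 + (n - m0) = n := by omega
  have h3 := (hstab (n - m0) y).2 h1
  rw [h2] at h3
  exact h3

theorem local_acyclic_of_pre (dct : List (Int × List (Int × Int))) (id_set : List Int)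
    (hP : Pre_get_rel_ct_dict dct id_set) (iid : Int) (hiid : iid ∈ id_set) :
    pvRootAcyclic dct iid := by
  intro a b hra hab hba
  have haR : a ∈ pvClosure dct id_set := closure_complete dct id_set iid a hiid hra
  have haC : a ∈ pvClosure dct (pvSuccKeys dct a) :=
    closure_complete dct (pvSuccKeys dct a) b a hab hba
  exact hP a haR haC


theorem pvDfs_eq (dct : List (Int × List (Int × Int))) :
    ∀ f v seen cts, pvRootAcyclic dct v → pvM dct v < f →
      (∀ x ∈ seen, (∀ y, pvReach dct x y → y ∈ seen) ∨ ¬ pvReach dct v x) →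
      pvDfs dct f v (seen, cts) =
        (seen ++ pvNews seen (pvAK dct f v),
         (pvNews seen (pvAK dct f v)).foldl pvBump cts) := by
  intro f
  induction f with
  | zero => intro v seen cts _ hf; omega
  | succ f ih =>
    intro v seen cts hRoot hf hInv
    rw [pvDfs]
    by_cases hv : v ∈ seen
    · have hc : PySem.Set.contains seen v = true := (PySem.Set.contains_iff _ _).2 hv
      rw [hc]
      have hsub : ∀ x ∈ pvAK dct (f+1) v, x ∈ seen := by
        intro x hx
        rcases hInv v hv with hcl | hnr
        · exact hcl x (reach_of_mem_pvAK dct (f+1) v x hx)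
        · exact absurd Relation.ReflTransGen.refl hnr
      rw [news_nil_of_subset _ _ hsub]
      simp
    · have hc : PySem.Set.contains seen v = false := by
        rcases h : PySem.Set.contains seen v with _ | _
        · rfl
        · exact absurd ((PySem.Set.contains_iff _ _).1 h) hv
      rw [hc]
      simp only [Bool.false_eq_true, if_false]
      have hfold : ∀ (cs : List (Int × Int)), ∀ (S : List Int) (cts2 : PySem.Dict Int Int),
          (∀ rd ∈ cs, pvEdge dct v rd.1) →
          (∀ x ∈ S, (∀ y, pvReach dct x y → y ∈ S) ∨ (∀ rd ∈ cs, ¬ pvReach dct rd.1 x)) →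
          cs.foldl (fun st2 rd => pvDfs dct f rd.1 st2) (S, cts2) =
            (S ++ pvNews S (cs.flatMap (fun rd => pvAK dct f rd.1)),
             (pvNews S (cs.flatMap (fun rd => pvAK dct f rd.1))).foldl pvBump cts2) := by
        intro cs
        induction cs with
        | nil => intro S cts2 _ _; simp [pvNews]
        | cons rd cs ihc =>
          intro S cts2 hE hI2
          have hEdge : pvEdge dct v rd.1 := hE rd (List.mem_cons_self ..)
          have hRootc : pvRootAcyclic dct rd.1 :=
            fun a c hra hac hca => hRoot a c (Relation.ReflTransGen.head hEdge hra) hac hca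
          have hMlt : pvM dct rd.1 < f := by
            have h1 := pvM_lt_of_edge dct v rd.1 hEdge
              (fun hr => hRoot v rd.1 Relation.ReflTransGen.refl hEdge hr)
            omega
          have hInvS : ∀ x ∈ S, (∀ y, pvReach dct x y → y ∈ S) ∨ ¬ pvReach dct rd.1 x := by
            intro x hx
            exact (hI2 x hx).imp id (fun h => h rd (List.mem_cons_self ..))
          rw [List.foldl_cons, ih rd.1 S cts2 hRootc hMlt hInvS]
          have hE' : ∀ rd' ∈ cs, pvEdge dct v rd'.1 :=
            fun rd' h => hE rd' (List.mem_cons_of_mem _ h)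
          have hI2' : ∀ x ∈ S ++ pvNews S (pvAK dct f rd.1),
              (∀ y, pvReach dct x y → y ∈ S ++ pvNews S (pvAK dct f rd.1)) ∨
              (∀ rd' ∈ cs, ¬ pvReach dct rd'.1 x) := by
            intro x hx
            rcases List.mem_append.1 hx with hxS | hxN
            · rcases hI2 x hxS with hcl | hall
              · exact Or.inl (fun y hy => List.mem_append.2 (Or.inl (hcl y hy)))
              · exact Or.inr (fun rd' h => hall rd' (List.mem_cons_of_mem _ h))
            · left
              intro y hy
              have hxA : x ∈ pvAK dct f rd.1 := mem_of_mem_news _ _ _ hxN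
              have hrx : pvReach dct rd.1 x := reach_of_mem_pvAK dct f rd.1 x hxA
              have hry : pvReach dct rd.1 y := Relation.ReflTransGen.trans hrx hy
              have hyA : y ∈ pvAK dct f rd.1 := mem_pvAK_of_reach dct f rd.1 hRootc hMlt y hry
              exact (mem_append_news _ _ _).2 (Or.inr hyA)
          rw [ihc _ _ hE' hI2']
          rw [List.flatMap_cons, news_append, List.foldl_append, List.append_assoc]
      have hmemv : (PySem.Set.add seen v, PySem.Dict.insert cts v (PySem.Dict.getD cts v 0 + 1)) =
          ((seen ++ [v] : List Int), pvBump cts v) := by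
        rw [PySem.Set.add_of_not_mem hv]; rfl
      rw [hmemv, hfold (pvSucc dct v) (seen ++ [v]) (pvBump cts v)
        (fun rd h => List.mem_map_of_mem h)
        (by
          intro x hx
          rcases List.mem_append.1 hx with hxS | hxv
          · rcases hInv x hxS with hcl | hnr
            · exact Or.inl (fun y hy => List.mem_append.2 (Or.inl (hcl y hy)))
            · refine Or.inr (fun rd hrd h => hnr ?_)
              exact Relation.ReflTransGen.head (List.mem_map_of_mem hrd) h
          · simp only [List.mem_singleton] at hxv
            subst hxv
            exact Or.inr (fun rd hrd h =>
              hRoot x rd.1 Relation.ReflTransGen.refl (List.mem_map_of_mem hrd) h))]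
      rw [pvAK_succ, news_update]
      have hL : ([v] ++ (pvSucc dct v).flatMap (fun rd => pvAK dct f rd.1) : List Int) =
          v :: (pvSucc dct v).flatMap (fun rd => pvAK dct f rd.1) := rfl
      rw [hL, pvNews, if_neg hv]
      rw [List.foldl_cons]
      have : (seen ++ [v]) ++ pvNews (seen ++ [v]) ((pvSucc dct v).flatMap (fun rd => pvAK dct f rd.1)) =
          seen ++ v :: pvNews (seen ++ [v]) ((pvSucc dct v).flatMap (fun rd => pvAK dct f rd.1)) := by
        rw [List.append_assoc]; rfl
      rw [this]


-- ===== VERDICT (by name: the statement is the Claim_ definition above) =====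
theorem get_rel_ct_dict_spec : Claim_equal_get_rel_ct_dict := by
  intro dct id_set hDom hPre
  unfold Spec_get_rel_ct_dict
  unfold get_rel_ct_dict get_rel_ct_dict_alt
  have hstep : (fun (cts2 : PySem.Dict Int Int) (r : Int) =>
      let c1 := if PySem.Dict.contains cts2 r then cts2 else PySem.Dict.insert cts2 r 0
      PySem.Dict.insert c1 r (PySem.Dict.getD c1 r 0 + 1)) = pvBump := by
    funext cts2 r
    by_cases h : PySem.Dict.contains cts2 r = true
    · simp only [h, if_true]
      rfl
    · have hb : PySem.Dict.contains cts2 r = false := by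
        rcases hx : PySem.Dict.contains cts2 r with _ | _
        · rfl
        · exact absurd hx h
      simp only [hb, Bool.false_eq_true, if_false]
      rw [PySem.Dict.getD_insert_self, PySem.Dict.insert_insert_self]
      unfold pvBump
      simp [PySem.Dict.getD_of_not_contains, hb]
  congr 1
  apply PySem.List.foldl_congr_mem
  intro cts iid hiid
  have hRoot : pvRootAcyclic dct iid := local_acyclic_of_pre dct id_set hPre iid hiid
  have hM : pvM dct iid < dct.length + 1 := by
    have h1 : pvM dct iid ≤ (dct.map Prod.fst).toFinset.card := by
      classical
      unfold pvM; exact Finset.card_filter_le _ _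
    have h2 := List.toFinset_card_le (dct.map Prod.fst)
    have h3 : (dct.map Prod.fst).length = dct.length := List.length_map ..
    omega
  have hdfs := pvDfs_eq dct (dct.length + 1) iid PySem.Set.empty cts hRoot hM
    (by intro x hx; simp [PySem.Set.empty] at hx)
  rw [hdfs]
  have hnil : pvNews PySem.Set.empty (pvAK dct (dct.length + 1) iid) =
      pvAK dct (dct.length + 1) iid := news_nil_left _ (pvAK_nodup dct _ iid)
  rw [hnil]
  rw [show pvRelSet dct iid = pvAK dct (dct.length + 1) iid from by
    unfold pvRelSet pvAK
    exact PySem.Set.ofList_eq_self_of_nodup _ (pvAK_nodup dct _ iid)]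
  rw [hstep]
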